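-- pv_equiv track=rewrite | github.com/tumBAIS/euro-meets-neurips-2022 | evaluation/src/visualization.py | clean_from_missing_values
-- ===== SOURCE A (Python) =====
-- from collections import OrderedDict
--
-- def clean_from_missing_values(results_saver):
--     output_saver = OrderedDict()
--     for key in results_saver.keys():
--         output_saver[key] = OrderedDict()
--         max_elements = max(len(i) for i in list(results_saver[key].values()))
--         for iteration in results_saver[key].keys():
--             if len(results_saver[key][iteration]) == max_elements:
--                 output_saver[key][iteration] = results_saver[key][iteration]
--     return output_saver
-- ===== SOURCE B (Python) =====
-- from collections import OrderedDict
--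
-- def clean_from_missing_values(results_saver):
--     output_saver = OrderedDict()
--     for key, inner in results_saver.items():
--         buckets = OrderedDict()
--         for iteration, value in inner.items():
--             buckets.setdefault(len(value), []).append((iteration, value))
--         output_saver[key] = OrderedDict(buckets[max(buckets)])
--     return output_saver
-- ===== Notes on version B (the rewrite author's own statement) =====
-- stated objective: alternative
-- what changed: Per key, A computes the max list length in one pass and then re-scans to filter; B makes a single grouping pass into a dict of length-indexed buckets and returns the bucket of the maximal length key.
import Mathlib
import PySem

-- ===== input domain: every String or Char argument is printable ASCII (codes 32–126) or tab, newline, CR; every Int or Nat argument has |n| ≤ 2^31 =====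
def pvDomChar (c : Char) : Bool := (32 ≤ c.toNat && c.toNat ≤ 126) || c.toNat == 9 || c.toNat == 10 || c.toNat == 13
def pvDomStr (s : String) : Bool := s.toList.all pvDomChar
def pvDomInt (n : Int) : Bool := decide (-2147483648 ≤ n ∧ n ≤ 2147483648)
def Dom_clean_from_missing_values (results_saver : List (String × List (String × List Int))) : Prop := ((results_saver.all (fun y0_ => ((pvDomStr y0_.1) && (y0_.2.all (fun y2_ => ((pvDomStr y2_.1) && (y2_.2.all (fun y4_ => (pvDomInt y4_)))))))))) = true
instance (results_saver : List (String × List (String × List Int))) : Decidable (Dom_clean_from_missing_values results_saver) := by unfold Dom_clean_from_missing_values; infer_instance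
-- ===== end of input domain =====

-- B replaces A's "compute the max length, then re-scan to filter" two-pass per key by one
-- grouping pass into length-indexed buckets followed by picking the max-length bucket
-- (objective: alternative decomposition, same asymptotic cost).

-- ===== PORT A =====
def clean_from_missing_values (results_saver : List (String × List (String × List Int))) : List (String × List (String × List Int)) :=
  results_saver.foldl (fun output_saver kv =>
    match PySem.List.max? (kv.2.map (fun i => PySem.List.len i.2)) (fun y => y) with
    | none => output_saver   -- Python raises ValueError here (max of empty); excluded by Pre_
    | some max_elements =>
        output_saver ++ [(kv.1,
          kv.2.foldl (fun inner it =>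
            if PySem.List.len it.2 = max_elements then inner ++ [it] else inner) [])]) []

-- ===== PORT B =====
def clean_from_missing_values_alt (results_saver : List (String × List (String × List Int))) : List (String × List (String × List Int)) :=
  results_saver.foldl (fun output_saver kv =>
    let buckets : PySem.Dict Int (List (String × List Int)) :=
      kv.2.foldl (fun b it => b.modify (PySem.List.len it.2) [] (fun l => l ++ [it])) PySem.Dict.empty
    match PySem.List.max? buckets.keys (fun y => y) with
    | none => output_saver   -- Python raises ValueError here (max of empty); excluded by Pre_
    | some m => output_saver ++ [(kv.1, buckets.getD m [])]) []

-- ===== PRECONDITION & SPEC =====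
-- Pre_ excludes exactly the inputs with an empty inner dict, on which Python A raises ValueError (max of an empty sequence).
def Pre_clean_from_missing_values (results_saver : List (String × List (String × List Int))) : Prop :=
  ∀ p ∈ results_saver, p.2 ≠ []
instance (results_saver : List (String × List (String × List Int))) : Decidable (Pre_clean_from_missing_values results_saver) := by unfold Pre_clean_from_missing_values; infer_instance
def pvWitness_clean_from_missing_values : (List (String × List (String × List Int))) :=
  [("a", [("i1", [1, 2]), ("i2", [3])])]
def Spec_clean_from_missing_values (results_saver : List (String × List (String × List Int))) (out : List (String × List (String × List Int))) : Prop := out = clean_from_missing_values_alt results_saver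
instance (results_saver : List (String × List (String × List Int))) (out : List (String × List (String × List Int))) : Decidable (Spec_clean_from_missing_values results_saver out) := by unfold Spec_clean_from_missing_values; infer_instance

-- ===== CLAIM (what is proved, stated in full; the proofs are below) =====
def Claim_equal_clean_from_missing_values : Prop := ∀ (results_saver : List (String × List (String × List Int))), Dom_clean_from_missing_values results_saver → Pre_clean_from_missing_values results_saver → Spec_clean_from_missing_values results_saver (clean_from_missing_values results_saver)

-- ===== LEMMAS AND PROOFS =====

-- the keys of B's bucket dictionary are the distinct lengths, in first-occurrence order
theorem pv_buckets_keys (l : List (String × List Int)) :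
    (l.foldl (fun b it => b.modify (PySem.List.len it.2) [] (fun v => v ++ [it]))
      (PySem.Dict.empty : PySem.Dict Int (List (String × List Int)))).keys
      = PySem.Set.ofList (l.map (fun it => PySem.List.len it.2)) := by
  have h := PySem.Dict.keys_foldl_modify_key (l := l)
    (key := fun it => PySem.List.len it.2) (d0 := ([] : List (String × List Int)))
    (f := fun _ it v => v ++ [it]) (d := PySem.Dict.empty)
  simpa [PySem.Set.update_nil_left] using h

-- max over the deduplicated list of Ints equals max over the original list
theorem pv_max?_ofList (xs : List Int) :
    PySem.List.max? (PySem.Set.ofList xs) (fun y => y) = PySem.List.max? xs (fun y => y) := by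
  cases xs with
  | nil => rfl
  | cons a t =>
    cases h : PySem.List.max? (a :: t) (fun y => y) with
    | none => rw [PySem.List.max?_eq_none_iff] at h; cases h
    | some m =>
      cases h' : PySem.List.max? (PySem.Set.ofList (a :: t)) (fun y => y) with
      | none =>
          rw [PySem.List.max?_eq_none_iff] at h'
          exfalso
          have ha : a ∈ PySem.Set.ofList (a :: t) := (PySem.Set.mem_ofList _ _).2 (by simp)
          rw [h'] at ha
          simp at ha
      | some m' =>
          have hm : m ∈ (a :: t) := PySem.List.max?_mem h
          have hm' : m' ∈ (a :: t) := (PySem.Set.mem_ofList _ _).1 (PySem.List.max?_mem h')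
          have h1 : m' ≤ m := PySem.List.max?_isMax h m' hm'
          have h2 : m ≤ m' := PySem.List.max?_isMax h' m ((PySem.Set.mem_ofList _ _).2 hm)
          rw [le_antisymm h2 h1]

-- the max-length bucket holds exactly the pairs of maximal length, in order
theorem pv_buckets_getD (l : List (String × List Int)) (m : Int) :
    (l.foldl (fun b it => b.modify (PySem.List.len it.2) [] (fun v => v ++ [it]))
      (PySem.Dict.empty : PySem.Dict Int (List (String × List Int)))).getD m []
      = l.filter (fun it => PySem.List.len it.2 == m) := by
  have hmap : l.foldl (fun b it => b.modify (PySem.List.len it.2) [] (fun v => v ++ [it]))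
      (PySem.Dict.empty : PySem.Dict Int (List (String × List Int)))
      = (l.map (fun it => (PySem.List.len it.2, it))).foldl
          (fun d p => d.modify p.1 [] (fun v => v ++ [p.2])) PySem.Dict.empty := by
    rw [List.foldl_map]
  rw [hmap, PySem.Dict.getD_foldl_modify_append]
  simp [List.filter_map, Function.comp_def]

-- the two per-key steps agree
theorem pv_step_eq (out : List (String × List (String × List Int)))
    (kv : String × List (String × List Int)) :
    (match PySem.List.max? (kv.2.map (fun i => PySem.List.len i.2)) (fun y => y) with
     | none => out
     | some max_elements =>
         out ++ [(kv.1,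
           kv.2.foldl (fun inner it =>
             if PySem.List.len it.2 = max_elements then inner ++ [it] else inner) [])])
    = (let buckets : PySem.Dict Int (List (String × List Int)) :=
        kv.2.foldl (fun b it => b.modify (PySem.List.len it.2) [] (fun l => l ++ [it])) PySem.Dict.empty
       match PySem.List.max? buckets.keys (fun y => y) with
       | none => out
       | some m => out ++ [(kv.1, buckets.getD m [])]) := by
  have hk : (kv.2.foldl (fun b it => b.modify (PySem.List.len it.2) [] (fun l => l ++ [it]))
      (PySem.Dict.empty : PySem.Dict Int (List (String × List Int)))).keys
      = PySem.Set.ofList (kv.2.map (fun it => PySem.List.len it.2)) := pv_buckets_keys kv.2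
  simp only [hk, pv_max?_ofList]
  cases h : PySem.List.max? (kv.2.map (fun i => PySem.List.len i.2)) (fun y => y) with
  | none => rfl
  | some m =>
      dsimp only
      rw [PySem.List.foldl_append_ite_eq_filter (fun (it : String × List Int) => PySem.List.len it.2 = m), pv_buckets_getD]
      congr 1

-- ===== VERDICT (by name: the statement is the Claim_ definition above) =====
theorem clean_from_missing_values_spec : Claim_equal_clean_from_missing_values := by
  intro rs _ _
  unfold Spec_clean_from_missing_values clean_from_missing_values clean_from_missing_values_alt
  apply PySem.List.foldl_congr_mem
  intro acc x _
  exact pv_step_eq acc x
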